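-- pv_equiv track=rewrite | github.com/wazuh/wazuh | framework/wazuh/utils.py | get_fields_to_nest
-- ===== SOURCE A (Python) =====
-- from itertools import groupby, chain
-- from operator import itemgetter
--
-- def get_fields_to_nest(fields, force_fields=[], split_character="_"):
--     nest = {k:set(filter(lambda x: x != k, chain.from_iterable(g)))
--              for k,g in groupby(map(lambda x: x.split(split_character), sorted(fields)),
--              key=lambda x:x[0])}
--     nested = filter(lambda x: len(x[1]) > 1 or x[0] in force_fields, nest.items())
--     nested = [(field,{(subfield, split_character.join([field,subfield])) for subfield in subfields}) for field, subfields in nested]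
--     non_nested = set(filter(lambda x: x.split(split_character)[0] not in map(itemgetter(0), nested), fields))
--     return nested, non_nested
-- ===== SOURCE B (Python) =====
-- def get_fields_to_nest(fields, force_fields=[], split_character="_"):
--     # Brute force instead of the sorted/groupby/chain/dict pipeline: collect the
--     # distinct prefixes (first-occurrence order over the sorted split fields),
--     # then one full rescan of the split fields per prefix to gather its
--     # deduplicated subfields; no dict, no groupby, no chain.
--     splits = [f.split(split_character) for f in sorted(fields)]
--     seen = []
--     for parts in splits:
--         if parts[0] not in seen:
--             seen.append(parts[0])
--     nested = []
--     for pre in seen: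
--         subs = []
--         for parts in splits:
--             if parts[0] == pre:
--                 for q in parts:
--                     if q != pre and q not in subs:
--                         subs.append(q)
--         if len(subs) > 1 or pre in force_fields:
--             nested.append((pre, {(s, pre + split_character + s) for s in subs}))
--     nested_prefixes = {p for p, _ in nested}
--     non_nested = {f for f in fields if f.split(split_character)[0] not in nested_prefixes}
--     return nested, non_nested
-- ===== Notes on version B (the rewrite author's own statement) =====
-- stated objective: alternative
-- what changed: Replaced the sorted/groupby/chain/itemgetter/dict pipeline by brute force: split the sorted fields once, collect the distinct prefixes in first-occurrence order, then one full rescan of the split fields per prefix to gather its deduplicated subfields (no dict, no groupby, no chain); equal because earlier non-adjacent occurrences of a prefix in the sorted list are always bare single-token fields, so a full rescan collects exactly what A's last groupby run (which wins the dict overwrite) collects.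
import Mathlib
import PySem

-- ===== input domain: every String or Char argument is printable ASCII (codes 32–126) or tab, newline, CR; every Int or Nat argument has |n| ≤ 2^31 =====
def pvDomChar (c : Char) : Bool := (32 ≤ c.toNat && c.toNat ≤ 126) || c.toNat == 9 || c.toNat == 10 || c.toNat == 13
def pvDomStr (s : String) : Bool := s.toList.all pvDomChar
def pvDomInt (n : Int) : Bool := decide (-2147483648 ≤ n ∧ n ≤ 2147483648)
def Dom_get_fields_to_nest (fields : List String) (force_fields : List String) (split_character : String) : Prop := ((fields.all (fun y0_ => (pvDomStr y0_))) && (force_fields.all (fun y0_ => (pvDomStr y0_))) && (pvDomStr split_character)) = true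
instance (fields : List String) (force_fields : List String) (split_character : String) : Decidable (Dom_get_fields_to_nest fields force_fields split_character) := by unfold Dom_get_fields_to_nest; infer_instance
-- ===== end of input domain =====

-- B replaces A's sorted/groupby/chain/dict pipeline by brute force: the distinct
-- prefixes in first-occurrence order, then one full rescan of the split fields per
-- prefix; exact same return value on every input with a non-empty split_character.

-- ===== PORT A =====
-- itertools.groupby over the split lists, keyed by the first token.
-- `headD ""` is exact for x[0] here: split with a non-empty separator never returns [].
def pyGroupbyHead : List (List String) → List (String × List (List String))
  | [] => []
  | x :: xs =>
    let k := x.headD ""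
    (k, x :: xs.takeWhile (fun y => y.headD "" == k)) ::
      pyGroupbyHead (xs.dropWhile (fun y => y.headD "" == k))
termination_by l => l.length
decreasing_by
  simpa using Nat.lt_succ_of_le (List.length_dropWhile_le _ _)

-- literal transliteration of A; `(split? …).getD []` is exact under Pre_ (sep ≠ "",
-- where split? is always `some`; Python raises ValueError on an empty separator).
def get_fields_to_nest (fields : List String) (force_fields : List String) (split_character : String) : (List (String × (List (String × String)))) × List String :=
  let splits := (PySem.List.sorted fields (fun x => x) false).map
    (fun x => (PySem.Str.split? x split_character).getD [])
  let nest : PySem.Dict String (PySem.Set String) :=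
    (pyGroupbyHead splits).foldl
      (fun d kg => d.insert kg.1 (PySem.Set.ofList (kg.2.flatten.filter (fun x => x ≠ kg.1))))
      PySem.Dict.empty
  let nested := (nest.items.filter
      (fun kv => decide (1 < kv.2.length) || force_fields.contains kv.1)).map
    (fun kv => (kv.1, PySem.Set.ofList (kv.2.map
      (fun sub => (sub, PySem.Str.join split_character [kv.1, sub])))))
  let non_nested := PySem.Set.ofList (fields.filter
    (fun x => ¬ (nested.map Prod.fst).contains
      (((PySem.Str.split? x split_character).getD []).headD "")))
  (nested, non_nested)

-- ===== PORT B =====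
-- Source B: split the sorted fields once; `seen` = distinct prefixes in first-occurrence
-- order; for each prefix a full rescan of `splits` collects its deduplicated
-- subfields; no dict, no groupby.
def get_fields_to_nest_alt (fields : List String) (force_fields : List String) (split_character : String) : (List (String × (List (String × String)))) × List String :=
  let splits := (PySem.List.sorted fields (fun x => x) false).map
    (fun f => (PySem.Str.split? f split_character).getD [])
  let seen := splits.foldl
    (fun s parts => if PySem.Set.contains s (parts.headD "") then s else s ++ [parts.headD ""]) []
  let nested := seen.foldl
    (fun acc pre =>
      let subs := splits.foldl
        (fun subs parts =>
          if parts.headD "" == pre then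
            parts.foldl (fun b q => if q ≠ pre ∧ ¬ (PySem.Set.contains b q) then b ++ [q] else b) subs
          else subs) []
      if decide (1 < subs.length) || force_fields.contains pre then
        acc ++ [(pre, PySem.Set.ofList (subs.map (fun s => (s, pre ++ split_character ++ s))))]
      else acc) []
  let nested_prefixes := PySem.Set.ofList (nested.map Prod.fst)
  let non_nested := PySem.Set.ofList (fields.filter
    (fun f => ¬ PySem.Set.contains nested_prefixes
      (((PySem.Str.split? f split_character).getD []).headD "")))
  (nested, non_nested)

-- ===== PRECONDITION & SPEC =====
-- Pre_ excludes only split_character = "", on which Python's str.split raises ValueError.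
def Pre_get_fields_to_nest (fields : List String) (force_fields : List String) (split_character : String) : Prop :=
  split_character ≠ ""
instance (fields : List String) (force_fields : List String) (split_character : String) : Decidable (Pre_get_fields_to_nest fields force_fields split_character) := by unfold Pre_get_fields_to_nest; infer_instance

def pvWitness_get_fields_to_nest : List String × List String × String :=
  (["a_b", "a_c", "d"], ["d"], "_")

def Spec_get_fields_to_nest (fields : List String) (force_fields : List String) (split_character : String) (out : (List (String × (List (String × String)))) × List String) : Prop := out = get_fields_to_nest_alt fields force_fields split_character
instance (fields : List String) (force_fields : List String) (split_character : String) (out : (List (String × (List (String × String)))) × List String) : Decidable (Spec_get_fields_to_nest fields force_fields split_character out) := by unfold Spec_get_fields_to_nest; infer_instance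

-- ===== CLAIM (what is proved, stated in full; the proofs are below) =====
def Claim_equal_get_fields_to_nest : Prop := ∀ (fields : List String) (force_fields : List String) (split_character : String), Dom_get_fields_to_nest fields force_fields split_character → Pre_get_fields_to_nest fields force_fields split_character → Spec_get_fields_to_nest fields force_fields split_character (get_fields_to_nest fields force_fields split_character)

-- ===== LEMMAS AND PROOFS =====

def mySplit (sep : List Char) : List Char → List (List Char)
  | [] => [[]]
  | c :: rest =>
    if h : sep.length = 0 then [c :: rest]
    else if sep.isPrefixOf (c :: rest) then
      [] :: mySplit sep ((c :: rest).drop sep.length)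
    else
      match mySplit sep rest with
      | [] => [[c]]
      | h :: t => (c :: h) :: t
termination_by l => l.length
decreasing_by
  · simp only [List.length_drop, List.length_cons]; omega
  · simp

theorem mySplit_ne_nil (sep l : List Char) : mySplit sep l ≠ [] := by
  cases l with
  | nil => simp [mySplit]
  | cons c rest =>
    unfold mySplit
    split
    · simp
    · split
      · simp
      · split <;> simp

def consHd (p : List Char) : List (List Char) → List (List Char)
  | [] => [p]
  | h :: t => (p ++ h) :: t

theorem go_eq_mySplit (sep : List Char) (hsep : sep ≠ []) :
    ∀ fuel l cur acc, l.length < fuel →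
      PySem.Chars.splitOn.go sep fuel l cur acc = acc.reverse ++ consHd cur.reverse (mySplit sep l) := by
  intro fuel
  induction fuel with
  | zero => intro l cur acc h; omega
  | succ n ih =>
    intro l cur acc h
    cases l with
    | nil =>
      simp [PySem.Chars.splitOn.go, mySplit, consHd]
    | cons c rest =>
      rw [PySem.Chars.splitOn.go]
      by_cases hp : sep.isPrefixOf (c :: rest) = true
      · rw [if_pos hp]
        have h1 : 1 ≤ sep.length := by
          cases sep with | nil => exact absurd rfl hsep | cons a b => simp
        rw [ih _ _ _ (by simp [List.length_drop] at h ⊢; omega)]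
        conv_rhs => unfold mySplit
        rw [dif_neg (by simpa using hsep), if_pos hp]
        rcases hm : mySplit sep (List.drop sep.length (c :: rest)) with _ | ⟨hd, tl⟩
        · exact absurd hm (mySplit_ne_nil _ _)
        · simp [consHd]
      · rw [if_neg hp]
        rw [ih _ _ _ (by simp at h ⊢; omega)]
        conv_rhs => unfold mySplit
        rw [dif_neg (by simpa using hsep), if_neg hp]
        rcases hm : mySplit sep rest with _ | ⟨hd, tl⟩
        · exact absurd hm (mySplit_ne_nil sep rest)
        · simp [consHd]

theorem splitOn_eq_mySplit (sep l : List Char) (hsep : sep ≠ []) :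
    PySem.Chars.splitOn l sep = mySplit sep l := by
  rw [PySem.Chars.splitOn, go_eq_mySplit sep hsep _ _ _ _ (Nat.lt_succ_self _)]
  rcases hm : mySplit sep l with _ | ⟨hd, tl⟩
  · exact absurd hm (mySplit_ne_nil _ _)
  · simp [consHd]

theorem mySplit_of_first_occ (sep : List Char) (hsep : sep ≠ []) :
    ∀ (t l : List Char), (∀ j < t.length, ¬ sep <+: (t ++ sep ++ l).drop j) →
      mySplit sep (t ++ sep ++ l) = t :: mySplit sep l := by
  intro t
  induction t with
  | nil =>
    intro l _
    cases hs : sep with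
    | nil => exact absurd hs hsep
    | cons a b =>
      rw [← hs]
      show mySplit sep (sep ++ l) = [] :: mySplit sep l
      cases hq : sep ++ l with
      | nil => simp [hs] at hq
      | cons c rest =>
        rw [← hq]
        conv_lhs => rw [hq]
        unfold mySplit
        rw [dif_neg (by simpa using hsep), if_pos (by rw [← hq]; exact List.isPrefixOf_iff_prefix.mpr (List.prefix_append sep l)), ← hq, List.drop_left]
        rw [← mySplit.eq_def]
  | cons c t' ih =>
    intro l hocc
    have h0 : ¬ sep <+: (c :: t') ++ sep ++ l := by
      have := hocc 0 (by simp)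
      simpa using this
    show mySplit sep (c :: (t' ++ sep ++ l)) = (c :: t') :: mySplit sep l
    unfold mySplit
    rw [dif_neg (by simpa using hsep), if_neg (by simpa [List.isPrefixOf_iff_prefix] using h0)]
    rw [ih l (fun j hj => by have := hocc (j+1) (by simpa using Nat.succ_lt_succ hj); simpa using this)]
    rw [← mySplit.eq_def]

theorem mySplit_multi (sep : List Char) (hsep : sep ≠ []) :
    ∀ (x t : List Char) (rest : List (List Char)), mySplit sep x = t :: rest → rest ≠ [] →
      (t ++ sep) <+: x ∧ ∀ j < t.length, ¬ sep <+: x.drop j := by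
  intro x
  induction x using mySplit.induct sep with
  | case1 =>
    intro t rest h hne
    simp only [mySplit] at h
    injection h with h1 h2
    exact absurd h2.symm hne
  | case2 c rest' h => exact absurd h (by simpa using hsep)
  | case3 c rest' hne0 hpre ih =>
    intro t rest h hrne
    unfold mySplit at h
    rw [dif_neg hne0, if_pos hpre] at h
    injection h with h1 h2
    subst h1
    exact ⟨by simpa [List.isPrefixOf_iff_prefix] using hpre, by simp⟩
  | case4 c rest' hne0 hpre hm ih =>
    exact absurd hm (mySplit_ne_nil _ _)
  | case5 c rest' hne0 hpre hd tl hm ih =>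
    intro t rest h hrne
    unfold mySplit at h
    rw [dif_neg hne0, if_neg hpre, hm] at h
    injection h with h1 h2
    subst h1 h2
    obtain ⟨h1, h2⟩ := ih hd tl hm hrne
    refine ⟨(List.cons_prefix_cons).mpr ⟨rfl, h1⟩, ?_⟩
    intro j hj
    cases j with
    | zero => simpa [List.isPrefixOf_iff_prefix] using hpre
    | succ j' => simpa using h2 j' (by simpa using hj)

theorem mySplit_single (sep : List Char) (hsep : sep ≠ []) :
    ∀ (x t : List Char), mySplit sep x = [t] → x = t := by
  intro x
  induction x using mySplit.induct sep with
  | case1 =>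
    intro t h
    simp only [mySplit] at h
    exact (List.cons.inj h).1
  | case2 c rest' h => exact absurd h (by simpa using hsep)
  | case3 c rest' hne0 hpre ih =>
    intro t h
    unfold mySplit at h
    rw [dif_neg hne0, if_pos hpre] at h
    injection h with h1 h2
    exact absurd h2 (mySplit_ne_nil _ _)
  | case4 c rest' hne0 hpre hm ih =>
    exact absurd hm (mySplit_ne_nil _ _)
  | case5 c rest' hne0 hpre hd tl hm ih =>
    intro t h
    unfold mySplit at h
    rw [dif_neg hne0, if_neg hpre, hm] at h
    injection h with h1 h2
    subst h2
    rw [← h1, ih hd hm]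

theorem cons_le_cons' (a b : Char) (l m : List Char) (h : (a::l) ≤ (b::m)) :
    a < b ∨ (a = b ∧ l ≤ m) := by
  rcases le_iff_lt_or_eq.mp h with h | h
  · cases h with
    | cons h => exact Or.inr ⟨rfl, le_of_lt h⟩
    | rel h => exact Or.inl h
  · injection h with h1 h2; exact Or.inr ⟨h1, by subst h2; rfl⟩

theorem not_cons_le_nil (a : Char) (l : List Char) : ¬ (a::l) ≤ ([] : List Char) := by
  rw [le_iff_lt_or_eq]
  rintro (h | h)
  · cases h
  · simp at h

theorem prefix_lt_of_ne (p x : List Char) (h : p <+: x) (hne : p ≠ x) : p < x := by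
  induction p generalizing x with
  | nil =>
    cases x with
    | nil => exact absurd rfl hne
    | cons c m => exact List.nil_lt_cons c m
  | cons a p' ih =>
    cases x with
    | nil => simpa using h.length_le
    | cons b m =>
      obtain ⟨hab, hp⟩ := List.cons_prefix_cons.mp h
      subst hab
      exact List.Lex.cons (ih m hp (by intro hc; exact hne (by rw [hc])))

theorem prefix_between (p x y z : List Char) (hx : p <+: x) (hz : p <+: z)
    (hxy : x ≤ y) (hyz : y ≤ z) : p <+: y := by
  induction p generalizing x y z with
  | nil => exact List.nil_prefix
  | cons a p' ih =>
    cases x with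
    | nil => simpa using hx.length_le
    | cons b m =>
      obtain ⟨hab, hpx⟩ := List.cons_prefix_cons.mp hx
      subst hab
      cases z with
      | nil => simpa using hz.length_le
      | cons d w =>
        obtain ⟨had, hpz⟩ := List.cons_prefix_cons.mp hz
        subst had
        cases y with
        | nil => exact absurd hxy (not_cons_le_nil _ _)
        | cons e v =>
          rcases cons_le_cons' _ _ _ _ hxy with h1 | ⟨h1, h1'⟩
          · rcases cons_le_cons' _ _ _ _ hyz with h2 | ⟨h2, h2'⟩
            · exact absurd (h1.trans h2) (lt_irrefl _)
            · subst h2; exact absurd h1 (lt_irrefl _)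
          · subst h1
            rcases cons_le_cons' _ _ _ _ hyz with h2 | ⟨h2, h2'⟩
            · exact absurd h2 (lt_irrefl _)
            · exact List.cons_prefix_cons.mpr ⟨rfl, ih m v w hpx hpz h1' h2'⟩

theorem crux (sep : List Char) (hsep : sep ≠ []) (x y z t : List Char)
    (hxy : x ≤ y) (hyz : y ≤ z)
    (hx : (mySplit sep x).headD [] = t) (hz : (mySplit sep z).headD [] = t)
    (hy : (mySplit sep y).headD [] ≠ t) : mySplit sep x = [t] := by
  rcases hmx : mySplit sep x with _ | ⟨hx0, restx⟩
  · exact absurd hmx (mySplit_ne_nil _ _)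
  · have hx0t : hx0 = t := by simpa [hmx] using hx
    rw [hx0t] at hmx
    by_cases hrx : restx = []
    · rw [hx0t, hrx]
    · exfalso
      obtain ⟨hpx, hox⟩ := mySplit_multi sep hsep x t restx hmx hrx
      rcases hmz : mySplit sep z with _ | ⟨hz0, restz⟩
      · exact absurd hmz (mySplit_ne_nil _ _)
      · have hz0t : hz0 = t := by simpa [hmz] using hz
        rw [hz0t] at hmz
        by_cases hrz : restz = []
        · -- z = t: contradiction with t < x ≤ y ≤ z = t
          rw [hrz] at hmz
          have hzt : z = t := mySplit_single sep hsep z t hmz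
          have htx : t <+: x := (List.prefix_append t sep).trans hpx
          have htnex : t ≠ x := by
            intro hc
            have hlen := hpx.length_le
            rw [← hc, List.length_append] at hlen
            exact hsep (List.length_eq_zero_iff.mp (by omega))
          have hlt : t < x := prefix_lt_of_ne t x htx htnex
          have hxz : x ≤ z := hxy.trans hyz
          rw [hzt] at hxz
          exact lt_irrefl _ (lt_of_lt_of_le hlt hxz)
        · obtain ⟨hpz, hoz⟩ := mySplit_multi sep hsep z t restz hmz hrz
          have hpy : (t ++ sep) <+: y := prefix_between (t ++ sep) x y z hpx hpz hxy hyz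
          have hoy : ∀ j < t.length, ¬ sep <+: y.drop j := by
            intro j hj hcon
            have h1 : (t ++ sep).drop j <+: y.drop j := hpy.drop j
            have h2 : sep <+: (t ++ sep).drop j := by
              apply List.prefix_of_prefix_length_le hcon h1
              rw [List.length_drop, List.length_append]
              omega
            exact hox j hj (h2.trans (hpx.drop j))
          obtain ⟨ly, hly⟩ := hpy
          have hyeq : y = t ++ sep ++ ly := by rw [← hly]
          rw [hyeq] at hoy
          have := mySplit_of_first_occ sep hsep t ly hoy
          rw [← hyeq] at this
          exact hy (by simp [this])

-- ==== String-level bridge ====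

def spF (sep f : String) : List String := (PySem.Str.split? f sep).getD []
def tkF (sep f : String) : String := (spF sep f).headD ""
def contribF (sep f : String) : List String := (spF sep f).filter (fun p => p ≠ tkF sep f)

theorem toList_ne_nil (sep : String) (h : sep ≠ "") : sep.toList ≠ [] := by
  intro hc; exact h (String.toList_inj.mp (by simp [hc]))

theorem spF_toList (sep f : String) (h : sep ≠ "") :
    (spF sep f).map String.toList = mySplit sep.toList f.toList := by
  have hbr := PySem.Str.split?_map f sep
  rcases hs : PySem.Str.split? f sep with _ | parts
  · rw [hs] at hbr
    simp [PySem.Chars.split?, List.isEmpty_iff, toList_ne_nil sep h] at hbr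
  · rw [hs] at hbr
    simp only [Option.map_some] at hbr
    have : PySem.Chars.split? f.toList sep.toList = some (PySem.Chars.splitOn f.toList sep.toList) := by
      simp [PySem.Chars.split?, List.isEmpty_iff, toList_ne_nil sep h]
    rw [this] at hbr
    simp only [spF, hs, Option.getD_some]
    rw [Option.some.inj hbr, splitOn_eq_mySplit _ _ (toList_ne_nil sep h)]

theorem spF_ne_nil (sep f : String) (h : sep ≠ "") : spF sep f ≠ [] := by
  intro hc
  have := spF_toList sep f h
  rw [hc] at this
  exact mySplit_ne_nil sep.toList f.toList this.symm

theorem tkF_toList (sep f : String) (h : sep ≠ "") :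
    (tkF sep f).toList = (mySplit sep.toList f.toList).headD [] := by
  have hsp := spF_toList sep f h
  rcases hc : spF sep f with _ | ⟨p, ps⟩
  · exact absurd hc (spF_ne_nil sep f h)
  · rw [hc] at hsp
    simp only [List.map_cons] at hsp
    rw [← hsp]
    simp [tkF, hc]

theorem cruxS (sep : String) (hsep : sep ≠ "") (x y z : String)
    (hxy : x ≤ y) (hyz : y ≤ z) (hxz : tkF sep x = tkF sep z)
    (hy : tkF sep y ≠ tkF sep x) : spF sep x = [tkF sep x] := by
  have hc := crux sep.toList (toList_ne_nil sep hsep) x.toList y.toList z.toList (tkF sep x).toList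
    (String.le_iff_toList_le.mp hxy) (String.le_iff_toList_le.mp hyz)
    (tkF_toList sep x hsep).symm (by rw [← tkF_toList sep z hsep, hxz])
    (by rw [← tkF_toList sep y hsep]; intro hcon; exact hy (String.toList_inj.mp hcon))
  have hsp := spF_toList sep x hsep
  rw [hc] at hsp
  rcases hl : spF sep x with _ | ⟨p, ps⟩
  · exact absurd hl (spF_ne_nil sep x hsep)
  · rw [hl] at hsp
    simp only [List.map_cons, List.cons.injEq, List.map_eq_nil_iff] at hsp
    rw [String.toList_inj.mp hsp.1, hsp.2]

theorem contribF_eq_nil (sep : String) (hsep : sep ≠ "") (x y z : String)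
    (hxy : x ≤ y) (hyz : y ≤ z) (hxz : tkF sep x = tkF sep z)
    (hy : tkF sep y ≠ tkF sep x) : contribF sep x = [] := by
  rw [contribF, cruxS sep hsep x y z hxy hyz hxz hy]
  simp

-- ==== dict layer: A's groupby fold equals the per-field accumulating fold stepB ====
def stepA (d : PySem.Dict String (PySem.Set String)) (kg : String × List (List String)) : PySem.Dict String (PySem.Set String) :=
  d.insert kg.1 (PySem.Set.ofList (kg.2.flatten.filter (fun x => x ≠ kg.1)))

def stepB (sep : String) (d : PySem.Dict String (PySem.Set String)) (field : String) : PySem.Dict String (PySem.Set String) :=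
  d.insert (tkF sep field)
    ((spF sep field).foldl
      (fun b p => if p ≠ tkF sep field ∧ ¬ (PySem.Set.contains b p) then b ++ [p] else b)
      (d.getD (tkF sep field) []))

theorem bucket_eq_update (pre : String) (parts : List String) :
    ∀ b : PySem.Set String,
      parts.foldl (fun b p => if p ≠ pre ∧ ¬ (PySem.Set.contains b p) then b ++ [p] else b) b
        = PySem.Set.update b (parts.filter (fun p => p ≠ pre)) := by
  induction parts with
  | nil => intro b; simp [PySem.Set.update]
  | cons p rest ih =>
    intro b
    simp only [List.foldl_cons, List.filter_cons]
    by_cases hp : p = pre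
    · rw [if_neg (fun h => h.1 hp), if_neg (by simp [hp])]
      exact ih b
    · by_cases hm : p ∈ b
      · rw [if_neg (fun h => h.2 (by simpa using hm)), if_pos (by simp [hp]), ih]
        simp [PySem.Set.update, PySem.Set.add, hm]
      · rw [if_pos ⟨hp, by simpa using hm⟩, if_pos (by simp [hp]), ih]
        simp [PySem.Set.update, PySem.Set.add, hm]

theorem update_update (b : PySem.Set String) (c1 c2 : List String) :
    PySem.Set.update (PySem.Set.update b c1) c2 = PySem.Set.update b (c1 ++ c2) := by
  simp [PySem.Set.update, List.foldl_append]

theorem update_nil_eq_ofList (c : List String) :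
    PySem.Set.update [] c = PySem.Set.ofList c := by
  rw [PySem.Set.ofList_eq_foldl]; rfl

theorem runB (sep k : String) : ∀ (run : List String), (∀ g ∈ run, tkF sep g = k) →
    ∀ (d : PySem.Dict String (PySem.Set String)) (b : PySem.Set String),
      run.foldl (stepB sep) (d.insert k b) = d.insert k (PySem.Set.update b (run.flatMap (contribF sep))) := by
  intro run
  induction run with
  | nil => intro _ d b; simp [PySem.Set.update]
  | cons g rest ih =>
    intro hall d b
    have hg : tkF sep g = k := hall g (by simp)
    simp only [List.foldl_cons]
    have hstep : stepB sep (d.insert k b) g = d.insert k (PySem.Set.update b (contribF sep g)) := by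
      rw [stepB, hg, PySem.Dict.getD_insert, if_pos rfl, bucket_eq_update,
        PySem.Dict.insert_insert_self]
      rw [contribF, hg]
    rw [hstep, ih (fun g' hg' => hall g' (by simp [hg'])) d (PySem.Set.update b (contribF sep g)),
      update_update]
    simp

theorem groupValue (sep k : String) : ∀ (run : List String), (∀ g ∈ run, tkF sep g = k) →
    ((run.map (spF sep)).flatten.filter (fun x => x ≠ k)) = run.flatMap (contribF sep) := by
  intro run
  induction run with
  | nil => intro _; simp
  | cons g rest ih =>
    intro hall
    have hg : tkF sep g = k := hall g (by simp)
    simp only [List.map_cons, List.flatten_cons, List.filter_append, List.flatMap_cons]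
    rw [ih (fun g' hg' => hall g' (by simp [hg']))]
    rw [contribF, hg]

theorem dict_eq (sep : String) (hsep : sep ≠ "") :
    ∀ (n : Nat) (L : List String), L.length ≤ n → L.Pairwise (fun a b => a ≤ b) →
      ∀ d : PySem.Dict String (PySem.Set String), (∀ f ∈ L, d.getD (tkF sep f) [] = []) →
        (pyGroupbyHead (L.map (spF sep))).foldl stepA d = L.foldl (stepB sep) d := by
  intro n
  induction n with
  | zero =>
    intro L hlen _ d _
    rw [List.length_eq_zero_iff.mp (Nat.le_zero.mp hlen)]
    simp [pyGroupbyHead]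
  | succ n ih =>
    intro L hlen hP d hd
    cases L with
    | nil => simp [pyGroupbyHead]
    | cons f rest =>
      -- names
      set k := tkF sep f with hk
      have hmap : ((fun (y : List String) => y.headD "" == (spF sep f).headD "") ∘ (spF sep)) = (fun g => tkF sep g == k) := by
        funext g; simp [tkF, hk]
      have hgrp : pyGroupbyHead ((f :: rest).map (spF sep)) =
          (k, (f :: rest.takeWhile (fun g => tkF sep g == k)).map (spF sep)) ::
            pyGroupbyHead ((rest.dropWhile (fun g => tkF sep g == k)).map (spF sep)) := by
        rw [List.map_cons, pyGroupbyHead]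
        simp only [List.takeWhile_map, List.dropWhile_map]
        rw [hmap]
        simp [hk, tkF]
      set tw := rest.takeWhile (fun g => tkF sep g == k) with htw
      set dw := rest.dropWhile (fun g => tkF sep g == k) with hdw
      set run := f :: tw with hrun
      have hallrun : ∀ g ∈ run, tkF sep g = k := by
        intro g hg
        rw [hrun] at hg
        rcases List.mem_cons.mp hg with h | h
        · rw [h, hk]
        · have := List.mem_takeWhile_imp (by rw [htw] at h; exact h)
          simpa using this
      have hsplit : f :: rest = run ++ dw := by
        rw [hrun, htw, hdw]; simp [List.takeWhile_append_dropWhile]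
      have hPsplit := hsplit ▸ hP
      rw [List.pairwise_append] at hPsplit
      obtain ⟨hPrun, hPdw, hRle⟩ := hPsplit
      -- A side first step
      have hdf : d.getD k [] = [] := hd f (by simp)
      set Crun := run.flatMap (contribF sep) with hCrun
      have hAstep : stepA d (k, run.map (spF sep)) = d.insert k (PySem.Set.ofList Crun) := by
        rw [stepA]
        simp only []
        rw [groupValue sep k run hallrun]
      -- B side over the run
      have hBrun : run.foldl (stepB sep) d = d.insert k (PySem.Set.ofList Crun) := by
        rw [hrun, List.foldl_cons]
        have hstepf : stepB sep d f = d.insert k (PySem.Set.update [] (contribF sep f)) := by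
          rw [stepB, ← hk, hdf, bucket_eq_update, contribF]
        rw [hstepf, runB sep k tw (fun g hg => hallrun g (by simp [hrun, hg])) d _, update_update,
          update_nil_eq_ofList]
        rw [hCrun, hrun]
        simp
      -- invariant for the tail
      have hd' : ∀ f' ∈ dw, (d.insert k (PySem.Set.ofList Crun)).getD (tkF sep f') [] = [] := by
        intro f' hf'
        by_cases hke : tkF sep f' = k
        · rw [hke, PySem.Dict.getD_insert, if_pos rfl]
          -- Crun = [] by the crux
          have hdwne : dw ≠ [] := List.ne_nil_of_mem hf'
          obtain ⟨y, t, hdweq⟩ : ∃ y t, dw = y :: t := by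
            rcases hdd : dw with _ | ⟨y, t⟩
            · exact absurd hdd hdwne
            · exact ⟨y, t, rfl⟩
          have hymem : y ∈ dw := by rw [hdweq]; simp
          have hyk : tkF sep y ≠ k := by
            have hne : rest.dropWhile (fun g => tkF sep g == k) ≠ [] := by rw [← hdw]; exact hdwne
            have h0 := List.head_dropWhile_not (fun g => tkF sep g == k) hne
            have heq : rest.dropWhile (fun g => tkF sep g == k) = y :: t := by rw [← hdw, hdweq]
            simp only [heq, List.head_cons] at h0
            simpa using h0
          have hyf' : y ≤ f' := by
            have hPdw' := hPdw
            rw [hdweq] at hf' hPdw'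
            rcases List.mem_cons.mp hf' with h | h
            · exact le_of_eq h.symm
            · exact (List.pairwise_cons.mp hPdw').1 f' h
          suffices hC : Crun = [] by simp [hC, PySem.Set.ofList]
          rw [hCrun, List.flatMap_eq_nil_iff]
          intro g hg
          exact contribF_eq_nil sep hsep g y f' (hRle g hg y hymem) hyf'
            (by rw [hallrun g hg, ← hke]) (by rw [hallrun g hg]; exact hyk)
        · rw [PySem.Dict.getD_insert, if_neg hke]
          exact hd f' (by
            rw [hsplit]
            exact List.mem_append_right run hf')
      -- assemble
      rw [hgrp, List.foldl_cons, hAstep]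
      conv_rhs => rw [hsplit, List.foldl_append, hBrun]
      exact ih dw
        (by
          have h1 : dw.length ≤ rest.length := by rw [hdw]; exact List.length_dropWhile_le _ _
          have h2 : rest.length ≤ n := by simpa using hlen
          omega)
        hPdw _ hd'

-- ==== items of the accumulating fold: first-occurrence keys, full-scan values ====

def allC (sep : String) (L : List String) (k : String) : List String :=
  (L.filter (fun f => tkF sep f == k)).flatMap (contribF sep)

theorem getD_stepB (sep : String) : ∀ (L : List String) (d : PySem.Dict String (PySem.Set String)) (k : String),
    (L.foldl (stepB sep) d).getD k [] = PySem.Set.update (d.getD k []) (allC sep L k) := by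
  intro L
  induction L with
  | nil => intro d k; simp [allC, PySem.Set.update]
  | cons g rest ih =>
    intro d k
    simp only [List.foldl_cons]
    have hstep : stepB sep d g
        = d.insert (tkF sep g) (PySem.Set.update (d.getD (tkF sep g) []) (contribF sep g)) := by
      rw [stepB, bucket_eq_update]; rfl
    rw [hstep, ih]
    by_cases hk : tkF sep g = k
    · subst hk
      rw [PySem.Dict.getD_insert, if_pos rfl, update_update]
      congr 1
      simp [allC]
    · rw [PySem.Dict.getD_insert, if_neg (fun h => hk h.symm)]
      congr 1
      simp [allC, hk]

theorem items_stepB (sep : String) (L : List String) :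
    (L.foldl (stepB sep) PySem.Dict.empty).items
      = (PySem.Set.ofList (L.map (tkF sep))).map (fun k => (k, PySem.Set.ofList (allC sep L k))) := by
  have hshape : stepB sep = fun (d : PySem.Dict String (PySem.Set String)) field =>
      d.insert (tkF sep field)
        ((spF sep field).foldl
          (fun b p => if p ≠ tkF sep field ∧ ¬ (PySem.Set.contains b p) then b ++ [p] else b)
          (d.getD (tkF sep field) [])) := rfl
  have hkeys : (L.foldl (stepB sep) PySem.Dict.empty).keys = PySem.Set.ofList (L.map (tkF sep)) := by
    rw [hshape, PySem.Dict.keys_foldl_insert_key]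
    simp [update_nil_eq_ofList]
  have hnodup : (L.foldl (stepB sep) PySem.Dict.empty).keys.Nodup := by
    rw [hshape]
    exact PySem.Dict.nodup_keys_foldl_insert_key _ _ _ _ (by simp)
  rw [PySem.Dict.items_eq_map_keys _ hnodup [], hkeys]
  apply List.map_congr_left
  intro k hk
  rw [getD_stepB]
  simp [update_nil_eq_ofList]

-- ==== B-side loop shapes ====

theorem seen_eq (sep : String) (L : List String) :
    ((L.map (spF sep)).foldl
      (fun s parts => if PySem.Set.contains s (parts.headD "") then s else s ++ [parts.headD ""]) [])
      = PySem.Set.ofList (L.map (tkF sep)) := by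
  have h1 : (fun (s : PySem.Set String) (parts : List String) =>
      if PySem.Set.contains s (parts.headD "") then s else s ++ [parts.headD ""])
      = fun s parts => PySem.Set.add s (parts.headD "") := rfl
  rw [h1, ← PySem.Set.update_map_eq_foldl_add, update_nil_eq_ofList, List.map_map]
  rfl

theorem subs_fold (pre : String) : ∀ (P : List (List String)) (s : PySem.Set String),
    P.foldl
      (fun subs parts =>
        if parts.headD "" == pre then
          parts.foldl (fun b q => if q ≠ pre ∧ ¬ (PySem.Set.contains b q) then b ++ [q] else b) subs
        else subs) s
      = PySem.Set.update s
          ((P.filter (fun parts => parts.headD "" == pre)).flatMap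
            (fun parts => parts.filter (fun q => q ≠ pre))) := by
  intro P
  induction P with
  | nil => intro s; simp [PySem.Set.update]
  | cons parts rest ih =>
    intro s
    simp only [List.foldl_cons, List.filter_cons]
    by_cases hp : (parts.headD "" == pre) = true
    · rw [if_pos hp, if_pos hp, List.flatMap_cons, bucket_eq_update, ih, update_update]
    · rw [if_neg hp, if_neg hp, ih]

theorem flat_eq (sep pre : String) (L : List String) :
    ((L.map (spF sep)).filter (fun parts => parts.headD "" == pre)).flatMap
        (fun parts => parts.filter (fun q => q ≠ pre))
      = allC sep L pre := by
  induction L with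
  | nil => simp [allC]
  | cons f rest ih =>
    simp only [List.map_cons, List.filter_cons, allC] at *
    by_cases hp : (tkF sep f == pre) = true
    · rw [if_pos (by simpa [tkF] using hp), if_pos hp]
      simp only [List.flatMap_cons]
      rw [ih]
      have : (spF sep f).filter (fun q => q ≠ pre) = contribF sep f := by
        rw [contribF, eq_of_beq hp]
      rw [this]
    · rw [if_neg (by simpa [tkF] using hp), if_neg hp]
      exact ih

theorem join_pair (sep a b : String) : PySem.Str.join sep [a, b] = a ++ sep ++ b := by
  apply String.toList_inj.mp
  rw [PySem.Str.toList_join]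
  simp [PySem.Chars.join_cons_cons, PySem.Chars.join_singleton, String.toList_append]

theorem contains_ofList (l : List String) (a : String) :
    (PySem.Set.ofList l).contains a = l.contains a := by
  by_cases h : a ∈ l <;> simp [h, PySem.Set.mem_ofList]

theorem main_eq (fields force_fields : List String) (sep : String) (hsep : sep ≠ "") :
    get_fields_to_nest fields force_fields sep = get_fields_to_nest_alt fields force_fields sep := by
  rw [get_fields_to_nest, get_fields_to_nest_alt]
  simp only []
  have hspF : (fun (x : String) => (PySem.Str.split? x sep).getD []) = spF sep := by
    funext x; rw [spF]
  set L := PySem.List.sorted fields (fun x => x) false with hL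
  have hsorted : L.Pairwise (fun a b => a ≤ b) := PySem.List.sorted_pairwise fields (fun x => x)
  -- A's nest fold = accumulating fold, then its items in closed form
  have hstepA : (fun (d : PySem.Dict String (PySem.Set String)) kg =>
      d.insert kg.1 (PySem.Set.ofList (kg.2.flatten.filter (fun x => x ≠ kg.1)))) = stepA := by
    funext d kg; rw [stepA]
  have hitems :
      ((pyGroupbyHead (L.map (fun x => (PySem.Str.split? x sep).getD []))).foldl
        (fun d kg => d.insert kg.1 (PySem.Set.ofList (kg.2.flatten.filter (fun x => x ≠ kg.1))))
        PySem.Dict.empty).items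
      = (PySem.Set.ofList (L.map (tkF sep))).map
          (fun k => (k, PySem.Set.ofList (allC sep L k))) := by
    rw [hspF, hstepA, dict_eq sep hsep L.length L le_rfl hsorted PySem.Dict.empty (fun f _ => rfl),
      ← items_stepB]
  rw [hitems]
  -- B's seen and nested loops in closed form
  rw [hspF, seen_eq]
  set K := PySem.Set.ofList (L.map (tkF sep)) with hK
  have hfold : ∀ pre, (L.map (spF sep)).foldl
        (fun subs parts =>
          if parts.headD "" == pre then
            parts.foldl (fun b q => if q ≠ pre ∧ ¬ (PySem.Set.contains b q) then b ++ [q] else b) subs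
          else subs) []
      = PySem.Set.ofList (allC sep L pre) := by
    intro pre
    rw [subs_fold, flat_eq, update_nil_eq_ofList]
  have hB : K.foldl
      (fun acc pre =>
        let subs := (L.map (spF sep)).foldl
          (fun subs parts =>
            if parts.headD "" == pre then
              parts.foldl (fun b q => if q ≠ pre ∧ ¬ (PySem.Set.contains b q) then b ++ [q] else b) subs
            else subs) []
        if decide (1 < subs.length) || force_fields.contains pre then
          acc ++ [(pre, PySem.Set.ofList (subs.map (fun s => (s, pre ++ sep ++ s))))]
        else acc) []
      = (K.map (fun k => (k, PySem.Set.ofList (allC sep L k)))).foldl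
        (fun acc kv =>
          if decide (1 < kv.2.length) || force_fields.contains kv.1 then
            acc ++ [(kv.1, PySem.Set.ofList (kv.2.map (fun s => (s, kv.1 ++ sep ++ s))))]
          else acc) [] := by
    rw [List.foldl_map]
    apply PySem.List.foldl_congr_mem
    intro acc pre _
    simp only [hfold pre]
  -- A's filter/map over the items equals B's foldl over K
  have hA : ((K.map (fun k => (k, PySem.Set.ofList (allC sep L k)))).filter
        (fun kv => decide (1 < kv.2.length) || force_fields.contains kv.1)).map
        (fun kv => (kv.1, PySem.Set.ofList (kv.2.map
          (fun sub => (sub, PySem.Str.join sep [kv.1, sub])))))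
      = (K.map (fun k => (k, PySem.Set.ofList (allC sep L k)))).foldl
        (fun acc kv =>
          if decide (1 < kv.2.length) || force_fields.contains kv.1 then
            acc ++ [(kv.1, PySem.Set.ofList (kv.2.map (fun s => (s, kv.1 ++ sep ++ s))))]
          else acc) [] := by
    rw [PySem.List.foldl_append_if]
    simp [join_pair]
  rw [hA, ← hB]
  -- non_nested: membership test through Set.ofList
  congr 1
  apply congrArg
  apply List.filter_congr
  intro x _
  rw [contains_ofList]

-- ===== VERDICT (by name: the statement is the Claim_ definition above) =====
theorem get_fields_to_nest_spec : Claim_equal_get_fields_to_nest := by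
  intro fields force_fields split_character _ hpre
  unfold Spec_get_fields_to_nest
  exact main_eq fields force_fields split_character hpre
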